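-- pv_equiv track=rewrite | github.com/hyuniiya/Algorithm | 프로그래머스/1/135808. 과일 장수/과일 장수.py | solution
-- ===== SOURCE A (Python) =====
-- def solution(k, m, score):
--     score.sort(reverse=True)
--
--     total_profit = 0
--
--     for i in range(0, len(score), m):
--         if i + m > len(score):
--             break
--         p = score[i + m - 1]
--         total_profit += p * m
--
--     return total_profit
-- ===== SOURCE B (Python) =====
-- def solution(k, m, score):
--     if m <= 0:
--         return 0
--     cnt = {}
--     for x in score:
--         cnt[x] = cnt.get(x, 0) + 1
--     n = len(score)
--     skip = n % m
--     total = 0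
--     c = 0
--     for v in sorted(cnt):
--         q = cnt[v]
--         hi = c + q - skip
--         lo = max(c - skip, 0)
--         if hi > 0:
--             total += v * m * ((hi + m - 1) // m - (lo + m - 1) // m)
--         c += q
--     return total
-- ===== Notes on version B (the rewrite author's own statement) =====
-- stated objective: alternative
-- what changed: B never sorts or indexes the full list: it builds a dict of occurrence counts in one pass, iterates the sorted distinct values, and computes each value's total contribution by ceiling-division arithmetic over the box-minimum positions, instead of A's full descending sort plus step-m indexing loop; B also does not mutate score (A sorts it in place).
import Mathlib
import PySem

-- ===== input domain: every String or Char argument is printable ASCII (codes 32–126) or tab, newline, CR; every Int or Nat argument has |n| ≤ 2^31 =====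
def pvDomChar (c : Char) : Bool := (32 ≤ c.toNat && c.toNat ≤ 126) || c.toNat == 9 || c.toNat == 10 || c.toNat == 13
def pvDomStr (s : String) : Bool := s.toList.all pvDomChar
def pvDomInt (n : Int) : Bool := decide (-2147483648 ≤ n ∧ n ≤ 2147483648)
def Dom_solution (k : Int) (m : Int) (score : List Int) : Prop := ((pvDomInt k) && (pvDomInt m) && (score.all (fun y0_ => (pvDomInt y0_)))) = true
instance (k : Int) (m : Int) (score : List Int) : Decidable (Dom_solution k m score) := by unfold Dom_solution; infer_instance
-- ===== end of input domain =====

-- B never sorts or indexes the whole list: it builds a dict of occurrence counts in one pass, walks the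
-- distinct values in ascending order, and computes each value's contribution by ceiling-division
-- arithmetic over the box-minimum positions (objective: alternative algorithm).
-- A sorts `score` in place; B does not mutate it — the equivalence proved here is about the return value only.

-- ===== PORT A =====
-- 'for i in range(0, len(score), m): if i+m > len(score): break; …' — recursion over the range list,
-- stopping at the first i with i+m > len (the break).  The default 0 of pyGetD is unreachable:
-- the guard makes the index i+m-1 in range wherever the Python indexes.
def solutionLoop (s : List Int) (m : Int) : List Int → Int → Int
  | [], total => total
  | i :: rest, total =>
    if PySem.List.len s < i + m then total
    else solutionLoop s m rest (total + PySem.List.pyGetD s (i + m - 1) 0 * m)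

def solution (k : Int) (m : Int) (score : List Int) : Int :=
  let s := PySem.List.sorted score (fun x => x) true
  solutionLoop s m (PySem.List.pyRange 0 (PySem.List.len s) m) 0

-- ===== PORT B =====
-- 'for v in sorted(cnt): q = cnt[v]; …' — fold over the ascending distinct values,
-- carrying the cumulative count c and the running total.
def walkRuns (cnt : PySem.Dict Int Int) (m skip : Int) : List Int → Int → Int → Int
  | [], _c, total => total
  | v :: vs, c, total =>
    let q : Int := cnt.getD v 0
    let hi := c + q - skip
    let lo := max (c - skip) 0
    walkRuns cnt m skip vs (c + q)
      (if 0 < hi then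
        total + v * m * (PySem.Int.floordiv (hi + m - 1) m - PySem.Int.floordiv (lo + m - 1) m)
      else total)

def solution_alt (k : Int) (m : Int) (score : List Int) : Int :=
  if m ≤ 0 then 0
  else
    let cnt := score.foldl (fun d x => d.insert x (d.getD x 0 + 1)) PySem.Dict.empty
    let n := PySem.List.len score
    walkRuns cnt m (PySem.Int.mod n m)
      (PySem.List.sorted cnt.keys (fun x => x) false) 0 0

-- ===== PRECONDITION & SPEC =====
-- Pre_ excludes exactly m = 0, where A raises ValueError (range step 0); B returns 0 there.
def Pre_solution (k : Int) (m : Int) (score : List Int) : Prop := m ≠ 0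
instance (k : Int) (m : Int) (score : List Int) : Decidable (Pre_solution k m score) := by unfold Pre_solution; infer_instance
def pvWitness_solution : Int × Int × List Int := (4, 3, [4, 1, 3, 1, 2, 2])

def Spec_solution (k : Int) (m : Int) (score : List Int) (out : Int) : Prop := out = solution_alt k m score
instance (k : Int) (m : Int) (score : List Int) (out : Int) : Decidable (Spec_solution k m score out) := by unfold Spec_solution; infer_instance

-- ===== CLAIM (what is proved, stated in full; the proofs are below) =====
def Claim_equal_solution : Prop := ∀ (k : Int) (m : Int) (score : List Int), Dom_solution k m score → Pre_solution k m score → Spec_solution k m score (solution k m score)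

-- ===== LEMMAS AND PROOFS =====

-- the run-length expansion of a value list
def runsFlat (score : List Int) (vs : List Int) : List Int :=
  vs.flatMap fun v => List.replicate (List.count v score) v

-- the descending sort is the reverse of the ascending sort (Int elements: equal keys are equal elements)
lemma sorted_rev_eq_reverse_sorted (xs : List Int) :
    PySem.List.sorted xs (fun x => x) true = (PySem.List.sorted xs (fun x => x) false).reverse := by
  have h : (PySem.List.sorted xs (fun x => x) true).reverse
      = PySem.List.sorted xs (fun x => x) false := by
    apply PySem.List.eq_of_perm_of_pairwise_le_of_injective (fun x => x) (fun a b h => h)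
    · exact (List.reverse_perm _).trans
        ((PySem.List.sorted_perm xs (fun x => x) true).trans
          (PySem.List.sorted_perm xs (fun x => x) false).symm)
    · exact List.pairwise_reverse.mpr (PySem.List.sorted_pairwise_rev xs (fun x => x))
    · exact PySem.List.sorted_pairwise xs (fun x => x)
  calc PySem.List.sorted xs (fun x => x) true
      = (PySem.List.sorted xs (fun x => x) true).reverse.reverse := (List.reverse_reverse _).symm
    _ = (PySem.List.sorted xs (fun x => x) false).reverse := by rw [h]

-- A's loop over a prefix none of whose indices triggers the break
lemma solutionLoop_append (s : List Int) (m : Int) (l rest : List Int)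
    (h : ∀ i ∈ l, ¬ PySem.List.len s < i + m) : ∀ total : Int,
    solutionLoop s m (l ++ rest) total
      = solutionLoop s m rest (total + (l.map (fun i => PySem.List.pyGetD s (i + m - 1) 0 * m)).sum) := by
  induction l with
  | nil => intro total; simp
  | cons a l ih =>
    intro total
    have ha := h a (List.mem_cons_self)
    simp only [List.cons_append, solutionLoop, if_neg ha, List.map_cons, List.sum_cons]
    rw [ih (fun i hi => h i (List.mem_cons_of_mem a hi))]
    ring_nf

-- A's loop stops immediately on a list whose head (if any) triggers the break
lemma solutionLoop_breaks (s : List Int) (m : Int) (l : List Int)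
    (h : ∀ i ∈ l, PySem.List.len s < i + m) (total : Int) :
    solutionLoop s m l total = total := by
  cases l with
  | nil => rfl
  | cons a l =>
    simp only [solutionLoop]
    rw [if_pos (h a List.mem_cons_self)]

-- A's value: m times the elements of the ascending sort at positions n%m, n%m + m, …
lemma solution_eq_boxSum (k m : Int) (score : List Int) (hm : 0 < m) :
    solution k m score
      = ∑ a ∈ Finset.range ((((PySem.List.sorted score (fun x => x) false).length : Int)) / m).toNat,
          (PySem.List.sorted score (fun x => x) false).getD
            ((((PySem.List.sorted score (fun x => x) false).length : Int) % m) + (a : Int) * m).toNat 0 * m := by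
  show solutionLoop (PySem.List.sorted score (fun x => x) true) m
      (PySem.List.pyRange 0 (PySem.List.len (PySem.List.sorted score (fun x => x) true)) m) 0 = _
  have hst : PySem.List.sorted score (fun x => x) true
      = (PySem.List.sorted score (fun x => x) false).reverse := sorted_rev_eq_reverse_sorted score
  set t := PySem.List.sorted score (fun x => x) false with ht
  set n : Int := (t.length : Int) with hn
  have hn0 : 0 ≤ n := by positivity
  simp only [hst, PySem.List.len_eq, List.length_reverse, ← hn]
  set q : Int := n / m with hqdef
  have hq0 : 0 ≤ q := Int.ediv_nonneg hn0 (le_of_lt hm)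
  have hqm_le : q * m ≤ n := Int.ediv_mul_le n (by omega)
  have hlt : n < (q + 1) * m := by
    have h1 := Int.emod_lt_of_pos n hm
    have h3 := Int.emod_add_mul_ediv n m
    nlinarith [h3]
  have hskipn : n % m = n - q * m := by
    have h1 := Int.emod_add_mul_ediv n m
    have h2 : q * m = m * (n / m) := by rw [hqdef]; ring
    omega
  rw [PySem.List.pyRange_of_pos 0 n hm]
  set C : Nat := (if (0 : Int) < n then ((n - 0 + m - 1) / m).toNat else 0) with hC
  have hCbounds : q.toNat ≤ C ∧ C ≤ q.toNat + 1 := by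
    by_cases hpos : (0 : Int) < n
    · have hCeq : (C : Int) = (n + m - 1) / m := by
        rw [hC, if_pos hpos, show n - 0 + m - 1 = n + m - 1 by ring]
        have : (0 : Int) ≤ (n + m - 1) / m := Int.ediv_nonneg (by omega) (le_of_lt hm)
        omega
      have hle : q ≤ (C : Int) := by
        rw [hCeq, Int.le_ediv_iff_mul_le hm]
        nlinarith [hqm_le]
      have hge : (C : Int) ≤ q + 1 := by
        by_contra hcon
        have h2 : q + 2 ≤ (C : Int) := by omega
        rw [hCeq, Int.le_ediv_iff_mul_le hm] at h2
        nlinarith [hlt]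
      omega
    · have hq' : q = 0 := by
        rw [hqdef, show n = 0 by omega]
        exact Int.zero_ediv m
      rw [hC, if_neg hpos, hq']
      simp
  have hsplit : List.range C
      = List.range q.toNat ++ (List.range (C - q.toNat)).map (fun x => q.toNat + x) := by
    rw [← List.range_add]
    congr 1
    omega
  rw [hsplit, List.map_append, solutionLoop_append, solutionLoop_breaks]
  · rw [zero_add]
    have hlist : ((List.range q.toNat).map
          (fun a : Nat => PySem.List.pyGetD t.reverse ((0 + m * (a : Int)) + m - 1) 0 * m)).sum
        = ∑ a ∈ Finset.range q.toNat,
            PySem.List.pyGetD t.reverse ((0 + m * (a : Int)) + m - 1) 0 * m := rfl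
    rw [List.map_map]
    rw [show ((fun i : Int => PySem.List.pyGetD t.reverse (i + m - 1) 0 * m) ∘ fun k : Nat => 0 + m * (k : Int))
        = fun a : Nat => PySem.List.pyGetD t.reverse ((0 + m * (a : Int)) + m - 1) 0 * m from rfl]
    rw [hlist, ← Finset.sum_range_reflect
      (fun a => t.getD ((n % m) + (a : Int) * m).toNat 0 * m) q.toNat]
    apply Finset.sum_congr rfl
    intro a ha
    have hka : a < q.toNat := Finset.mem_range.mp ha
    set i1 : Int := 0 + m * (a : Int) + m - 1 with hi1
    have hprod : 0 ≤ m * (a : Int) := by positivity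
    have hbox : ((a : Int) + 1) * m ≤ n := by
      have h1 : (a : Int) + 1 ≤ q := by omega
      nlinarith [h1]
    have hi1_nonneg : (0 : Int) ≤ i1 := by rw [hi1]; omega
    have hi1_lt : i1 < n := by rw [hi1]; nlinarith [hbox]
    rw [PySem.List.pyGetD_of_nonneg _ _ hi1_nonneg]
    have hidx_lt : i1.toNat < t.length := by omega
    rw [List.getD_reverse _ hidx_lt]
    have hcast : ((q.toNat - 1 - a : Nat) : Int) = q - 1 - (a : Int) := by omega
    have hexp : ((a : Int) + 1) * m = m * (a : Int) + m := by ring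
    have key : (n % m) + ((q.toNat - 1 - a : Nat) : Int) * m = n - ((a : Int) + 1) * m := by
      rw [hcast, hskipn]; ring
    have hidx_eq : ((n % m) + ((q.toNat - 1 - a : Nat) : Int) * m).toNat
        = t.length - 1 - i1.toNat := by
      omega
    rw [hidx_eq]
  · -- tail elements all break:  (q.toNat + x)*m + m > n
    intro i hi
    simp only [List.mem_map] at hi
    obtain ⟨x, hx, rfl⟩ := hi
    obtain ⟨a', -, rfl⟩ := hx
    simp only [PySem.List.len_eq, List.length_reverse, ← hn]
    push_cast
    have h2 : (q + 1) * m ≤ ((q.toNat : Int) + (a' : Int) + 1) * m :=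
      mul_le_mul_of_nonneg_right (by omega) (le_of_lt hm)
    nlinarith [hlt, h2]
  · -- prefix elements never break:  a*m + m ≤ n for a < q.toNat
    intro i hi
    simp only [List.mem_map, List.mem_range] at hi
    obtain ⟨x, hx, rfl⟩ := hi
    simp only [PySem.List.len_eq, List.length_reverse, ← hn]
    push_cast
    have h1 : (x : Int) + 1 ≤ q := by omega
    have h2 : ((x : Int) + 1) * m ≤ n := by nlinarith [h1]
    intro hcon
    nlinarith [h2, hcon]

-- the ascending sort is the run-length expansion of the ascending distinct values
lemma count_runsFlat (score : List Int) (vs : List Int) (h : vs.Nodup) (x : Int) :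
    List.count x (runsFlat score vs) = if x ∈ vs then List.count x score else 0 := by
  induction vs with
  | nil => simp [runsFlat]
  | cons v vs ih =>
    rcases List.nodup_cons.mp h with ⟨hv, hnd⟩
    simp only [runsFlat, List.flatMap_cons, List.count_append]
    rw [show (List.flatMap (fun v => List.replicate (List.count v score) v) vs)
        = runsFlat score vs from rfl, ih hnd, List.count_replicate]
    by_cases hx : x = v
    · subst hx
      simp [hv]
    · simp [List.mem_cons, hx, Ne.symm hx]

lemma sorted_eq_runsFlat (score : List Int) :
    PySem.List.sorted score (fun x => x) false
      = runsFlat score (PySem.List.sorted (PySem.Set.ofList score) (fun x => x) false) := by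
  have hnd : (PySem.List.sorted (PySem.Set.ofList score) (fun x => x) false).Nodup :=
    (PySem.List.sorted_perm (PySem.Set.ofList score) (fun x => x) false).symm.nodup
      (PySem.Set.nodup_ofList score)
  apply PySem.List.sorted_id_eq_of_perm_of_pairwise
  · -- the expansion is a permutation of score: equal counts everywhere
    rw [List.perm_iff_count]
    intro x
    rw [count_runsFlat score _ hnd x]
    by_cases hx : x ∈ score
    · rw [if_pos]
      rw [PySem.List.mem_sorted, PySem.Set.mem_ofList]
      exact hx
    · rw [List.count_eq_zero_of_not_mem hx, if_neg]
      rw [PySem.List.mem_sorted, PySem.Set.mem_ofList]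
      exact hx
  · -- the expansion is weakly increasing
    rw [runsFlat, List.pairwise_flatMap]
    constructor
    · intro a _
      exact List.pairwise_replicate.mpr (Or.inr le_rfl)
    · refine (PySem.List.sorted_ofList_pairwise_lt score).imp ?_
      intro a b hab x hx y hy
      rw [List.mem_replicate] at hx hy
      rw [hx.2, hy.2]
      exact le_of_lt hab

-- the ceiling-division hit count is the number of box positions inside [c, c+q)
lemma hits_count (m skip c q : Int) (T : Nat) (hm : 0 < m) (hskip : 0 ≤ skip)
    (hc : 0 ≤ c) (hq : 0 ≤ q) (hbound : c + q ≤ skip + (T : Int) * m) :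
    ∑ a ∈ Finset.range T,
        (if c ≤ skip + (a : Int) * m ∧ skip + (a : Int) * m < c + q then (1 : Int) else 0)
      = if 0 < c + q - skip then
          (c + q - skip + m - 1) / m - (max (c - skip) 0 + m - 1) / m
        else 0 := by
  by_cases hpos : 0 < c + q - skip
  · rw [if_pos hpos]
    set lo : Int := max (c - skip) 0 with hlo
    set hi : Int := c + q - skip with hhi
    have hlo0 : 0 ≤ lo := le_max_right _ _
    have hlohi : lo ≤ hi := by
      rcases le_total (c - skip) 0 with h | h <;> simp [hlo, hhi] <;> omega
    have hloI0 : 0 ≤ (lo + m - 1) / m := Int.ediv_nonneg (by omega) (by omega)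
    have hhiI0 : 0 ≤ (hi + m - 1) / m := Int.ediv_nonneg (by omega) (by omega)
    set loN : Nat := ((lo + m - 1) / m).toNat with hloN
    set hiN : Nat := ((hi + m - 1) / m).toNat with hhiN
    have hcastlo : (loN : Int) = (lo + m - 1) / m := by omega
    have hcasthi : (hiN : Int) = (hi + m - 1) / m := by omega
    have hbrlo : ∀ a : Nat, loN ≤ a ↔ lo ≤ (a : Int) * m := by
      intro a
      have h1 : ((lo + m - 1) / m) * m ≤ lo + m - 1 := Int.ediv_mul_le _ (by omega)
      have h2 : lo + m - 1 < ((lo + m - 1) / m + 1) * m := Int.lt_ediv_add_one_mul_self _ hm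
      constructor
      · intro h
        have : (loN : Int) ≤ (a : Int) := by exact_mod_cast h
        nlinarith [this, h1, h2]
      · intro h
        have : (loN : Int) ≤ (a : Int) := by
          rw [hcastlo]
          have h3 : ((lo + m - 1) / m) * m < ((a : Int) + 1) * m := by nlinarith
          have h4 : (lo + m - 1) / m < (a : Int) + 1 := lt_of_mul_lt_mul_right h3 (le_of_lt hm)
          omega
        exact_mod_cast this
    have hbrhi : ∀ a : Nat, a < hiN ↔ (a : Int) * m < hi := by
      intro a
      have h1 : ((hi + m - 1) / m) * m ≤ hi + m - 1 := Int.ediv_mul_le _ (by omega)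
      have h2 : hi + m - 1 < ((hi + m - 1) / m + 1) * m := Int.lt_ediv_add_one_mul_self _ hm
      constructor
      · intro h
        have h3 : (a : Int) + 1 ≤ (hiN : Int) := by exact_mod_cast h
        nlinarith [h1, h3]
      · intro h
        have h3 : ((a : Int) + 1) * m ≤ hi + m - 1 := by nlinarith
        have h4 : (a : Int) + 1 ≤ (hi + m - 1) / m := (Int.le_ediv_iff_mul_le hm).mpr h3
        have : (a : Int) + 1 ≤ (hiN : Int) := by rw [hcasthi]; exact h4
        exact_mod_cast this
    have hiff : ∀ a : Nat,
        (c ≤ skip + (a : Int) * m ∧ skip + (a : Int) * m < c + q) ↔ (loN ≤ a ∧ a < hiN) := by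
      intro a
      have ham : 0 ≤ (a : Int) * m := by positivity
      rw [hbrlo a, hbrhi a]
      rcases le_total (c - skip) 0 with h | h
      · rw [show lo = 0 by simp [hlo]; omega]
        constructor
        · intro hh; exact ⟨ham, by omega⟩
        · intro hh; exact ⟨by omega, by omega⟩
      · rw [show lo = c - skip by simp [hlo]; omega]
        constructor
        · intro hh; exact ⟨by omega, by omega⟩
        · intro hh; exact ⟨by omega, by omega⟩
    have hsub : Finset.Ico loN hiN ⊆ Finset.range T := by
      intro a ha
      rw [Finset.mem_Ico] at ha
      rw [Finset.mem_range]
      have h5 : (hiN : Int) ≤ (T : Int) := by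
        rw [hcasthi]
        have h3 : hi + m - 1 < ((T : Int) + 1) * m := by nlinarith [hbound]
        have h4 : (hi + m - 1) / m < (T : Int) + 1 := by
          by_contra hcon
          push Not at hcon
          have := (Int.le_ediv_iff_mul_le hm).mp hcon
          nlinarith
        omega
      have : (hiN : Nat) ≤ T := by exact_mod_cast h5
      omega
    calc ∑ a ∈ Finset.range T,
          (if c ≤ skip + (a : Int) * m ∧ skip + (a : Int) * m < c + q then (1 : Int) else 0)
        = ∑ a ∈ Finset.range T, (if a ∈ Finset.Ico loN hiN then (1 : Int) else 0) := by
          apply Finset.sum_congr rfl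
          intro a _
          have h := hiff a
          split_ifs with h1 h2 h2
          · rfl
          · exact absurd (Finset.mem_Ico.mpr (h.mp h1)) h2
          · exact absurd (h.mpr (Finset.mem_Ico.mp h2)) h1
          · rfl
      _ = ∑ a ∈ Finset.range T ∩ Finset.Ico loN hiN, (1 : Int) :=
            Finset.sum_ite_mem (Finset.range T) (Finset.Ico loN hiN) (fun _ => (1 : Int))
      _ = ∑ a ∈ Finset.Ico loN hiN, (1 : Int) := by rw [Finset.inter_eq_right.mpr hsub]
      _ = ((hiN - loN : Nat) : Int) := by rw [Finset.sum_const, Nat.card_Ico]; simp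
      _ = (hi + m - 1) / m - (lo + m - 1) / m := by
          have hmono : loN ≤ hiN := by
            have := Int.ediv_le_ediv hm (show lo + m - 1 ≤ hi + m - 1 by omega)
            omega
          omega
  · rw [if_neg hpos]
    apply Finset.sum_eq_zero
    intro a _
    rw [if_neg]
    rintro ⟨h1, h2⟩
    have ham : 0 ≤ (a : Int) * m := by positivity
    omega

-- B's fold computes m times the run values at the box positions ≥ c
lemma walkRuns_eq (score : List Int) (m skip : Int) (hm : 0 < m) (hskip : 0 ≤ skip) (T : Nat) :
    ∀ (vs : List Int) (c total : Int), 0 ≤ c →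
      c + ((runsFlat score vs).length : Int) ≤ skip + (T : Int) * m →
      walkRuns (PySem.Dict.counter score) m skip vs c total
        = total + ∑ a ∈ Finset.range T,
            (if c ≤ skip + (a : Int) * m then
              (runsFlat score vs).getD (skip + (a : Int) * m - c).toNat 0
            else 0) * m := by
  intro vs
  induction vs with
  | nil =>
    intro c total _ _
    simp [walkRuns, runsFlat]
  | cons v vs ih =>
    intro c total hc hb
    have hlenc : ((runsFlat score (v :: vs)).length : Int)
        = (List.count v score : Int) + ((runsFlat score vs).length : Int) := by
      simp [runsFlat, List.flatMap_cons]
    set qN : Nat := List.count v score with hqN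
    set q : Int := (qN : Int) with hq
    have hq0 : 0 ≤ q := by positivity
    have hbq : c + q ≤ skip + (T : Int) * m := by
      have : (0 : Int) ≤ ((runsFlat score vs).length : Int) := by positivity
      omega
    have hstep : walkRuns (PySem.Dict.counter score) m skip (v :: vs) c total
        = walkRuns (PySem.Dict.counter score) m skip vs (c + q)
            (if 0 < c + q - skip then
              total + v * m * ((c + q - skip + m - 1) / m - (max (c - skip) 0 + m - 1) / m)
            else total) := by
      simp only [walkRuns, PySem.Dict.getD_counter, ← hqN, ← hq,
        PySem.Int.floordiv_eq_ediv_of_pos hm]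
    rw [hstep, ih (c + q) _ (by omega) (by omega)]
    have hterm : ∀ a ∈ Finset.range T,
        (if c ≤ skip + (a : Int) * m then
            (runsFlat score (v :: vs)).getD (skip + (a : Int) * m - c).toNat 0
          else 0) * m
        = (if c ≤ skip + (a : Int) * m ∧ skip + (a : Int) * m < c + q then (1 : Int) else 0) * (v * m)
          + (if c + q ≤ skip + (a : Int) * m then
              (runsFlat score vs).getD (skip + (a : Int) * m - (c + q)).toNat 0
            else 0) * m := by
      intro a _
      set p : Int := skip + (a : Int) * m with hp
      have hflatcons : runsFlat score (v :: vs)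
          = List.replicate qN v ++ runsFlat score vs := by
        simp [runsFlat, List.flatMap_cons, hqN]
      by_cases h1 : c ≤ p
      · by_cases h2 : p < c + q
        · have hidx : (p - c).toNat < qN := by omega
          rw [if_pos h1, if_pos ⟨h1, h2⟩, if_neg (show ¬ c + q ≤ p by omega), hflatcons,
            List.getD_append _ _ _ _ (by rw [List.length_replicate]; exact hidx)]
          have hv : (List.replicate qN v).getD (p - c).toNat 0 = v := by
            rw [List.getD_eq_getElem?_getD, List.getElem?_replicate, if_pos hidx]
            rfl
          rw [hv]
          ring
        · have hidx : qN ≤ (p - c).toNat := by omega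
          rw [if_pos h1, if_neg (fun hh : _ ∧ _ => h2 hh.2),
            if_pos (show c + q ≤ p by omega), hflatcons,
            List.getD_append_right _ _ _ _ (by rw [List.length_replicate]; exact hidx)]
          have hsub : (p - c).toNat - (List.replicate qN v).length = (p - (c + q)).toNat := by
            rw [List.length_replicate]; omega
          rw [hsub]
          ring
      · rw [if_neg h1, if_neg (fun hh : _ ∧ _ => h1 hh.1), if_neg (show ¬ c + q ≤ p by omega)]
        ring
    rw [Finset.sum_congr rfl hterm, Finset.sum_add_distrib,
      ← Finset.sum_mul (Finset.range T)
        (fun a => if c ≤ skip + (a : Int) * m ∧ skip + (a : Int) * m < c + q then (1 : Int) else 0)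
        (v * m),
      hits_count m skip c q T hm hskip hc hq0 hbq]
    split_ifs with hpos
    · ring
    · ring

-- ===== VERDICT (by name: the statement is the Claim_ definition above) =====
theorem solution_spec : Claim_equal_solution := by
  intro k m score _ hpre
  unfold Spec_solution
  rcases lt_or_gt_of_ne hpre with hm | hm
  · -- m < 0 : A's range is empty, B returns 0 by its guard
    have hA : solution k m score = 0 := by
      show solutionLoop _ m (PySem.List.pyRange 0 (PySem.List.len (PySem.List.sorted score (fun x => x) true)) m) 0 = 0
      have hemp : PySem.List.pyRange 0 (PySem.List.len (PySem.List.sorted score (fun x => x) true)) m = [] := by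
        simp only [PySem.List.pyRange, if_neg (show m ≠ 0 by omega)]
        simp [show ¬ (0 : Int) < m by omega]
      rw [hemp]; rfl
    rw [hA]
    unfold solution_alt
    rw [if_pos (by omega)]
  · -- m > 0
    have hB : solution_alt k m score
        = walkRuns (PySem.Dict.counter score) m (PySem.Int.mod (PySem.List.len score) m)
            (PySem.List.sorted (PySem.Set.ofList score) (fun x => x) false) 0 0 := by
      unfold solution_alt
      rw [if_neg (by omega)]
      simp only [PySem.Dict.foldl_insert_getD_add_one_eq_counter, PySem.Dict.keys_counter]
    set t := PySem.List.sorted score (fun x => x) false with ht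
    set vs := PySem.List.sorted (PySem.Set.ofList score) (fun x => x) false with hvs
    have hflat : t = runsFlat score vs := sorted_eq_runsFlat score
    have hlen : t.length = score.length := PySem.List.length_sorted score (fun x => x) false
    set n : Int := (score.length : Int) with hn
    have hskip : PySem.Int.mod n m = n % m := PySem.Int.mod_eq_emod_of_pos hm
    have hskip0 : 0 ≤ n % m := Int.emod_nonneg n (by omega)
    have hbound : (0 : Int) + ((runsFlat score vs).length : Int) ≤ n % m + ((n / m).toNat : Int) * m := by
      rw [← hflat, hlen, ← hn]
      have h1 : ((n / m).toNat : Int) = n / m := by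
        have : 0 ≤ n / m := Int.ediv_nonneg (by positivity) (le_of_lt hm)
        omega
      rw [h1]
      have := Int.emod_add_mul_ediv n m
      nlinarith [this]
    rw [hB, PySem.List.len_eq, ← hn, hskip]
    rw [walkRuns_eq score m (n % m) hm hskip0 ((n / m).toNat) vs 0 0 le_rfl hbound]
    rw [solution_eq_boxSum k m score hm]
    rw [← ht, hlen, ← hn, zero_add]
    apply Finset.sum_congr rfl
    intro a _
    have hpos : 0 ≤ n % m + (a : Int) * m := by positivity
    rw [if_pos hpos, hflat, sub_zero]
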